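-- pv_equiv track=rewrite | github.com/ruguangyou/ossu-cs | Core CS/core systems/Build a Modern Computer from First Principles/project 07/VMTranslator_a.py | commandParse
-- ===== SOURCE A (Python) =====
-- def commandParse(line):
-- 	# ignore white space and comments
-- 	# return the list of args, if there is no command just return an empty list
-- 	args = []
-- 	temp = ''
-- 	for c in line:
-- 		if c == '/':
-- 			break
-- 		if c != ' ' and c != '\n':
-- 			temp += c
-- 		elif temp != '':
-- 			args.append(temp)
-- 			temp = ''
-- 	return args
-- ===== SOURCE B (Python) =====
-- def commandParse(line):
--     # ignore white space and comments; a token counts only when closed by ' ' or '\n'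
--     i = line.find('/')
--     prefix = line if i == -1 else line[:i]
--     parts = prefix.replace('\n', ' ').split(' ')
--     return [t for t in parts[:-1] if t]
-- ===== Notes on version B (the rewrite author's own statement) =====
-- stated objective: faster
-- what changed: A accumulates characters one by one in a Python-level loop with a temp buffer and break at the comment marker; B cuts the comment off with find+slice, normalizes newlines with replace, splits on spaces, drops the last (unterminated) piece and filters empties, doing all scanning in bulk string operations.
import Mathlib
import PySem

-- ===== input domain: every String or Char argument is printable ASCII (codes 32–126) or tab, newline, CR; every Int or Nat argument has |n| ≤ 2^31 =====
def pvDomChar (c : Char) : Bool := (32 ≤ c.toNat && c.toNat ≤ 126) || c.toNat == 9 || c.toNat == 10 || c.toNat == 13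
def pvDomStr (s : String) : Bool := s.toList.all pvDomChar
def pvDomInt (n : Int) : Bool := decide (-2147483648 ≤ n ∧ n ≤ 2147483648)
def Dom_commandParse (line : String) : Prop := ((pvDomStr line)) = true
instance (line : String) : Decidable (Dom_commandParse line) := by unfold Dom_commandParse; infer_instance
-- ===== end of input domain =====

-- B replaces A's per-character accumulator loop by a bulk find/slice + replace + split pipeline (measurably faster in Python); return values proved equal on the whole domain.


-- ===== PORT A =====
-- the for-loop of A: state = (args, temp); 'break' on '/' returns args
def commandParseLoop : List Char → List String → List Char → List String
  | [], args, _ => args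
  | c :: rest, args, temp =>
    if c = '/' then args
    else if c ≠ ' ' ∧ c ≠ '\n' then commandParseLoop rest args (temp ++ [c])
    else if temp ≠ [] then commandParseLoop rest (args ++ [String.ofList temp]) []
    else commandParseLoop rest args temp

def commandParse (line : String) : List String :=
  commandParseLoop line.toList [] []

-- ===== PORT B =====
-- i = line.find('/'); prefix = line if i == -1 else line[:i];
-- parts = prefix.replace('\n',' ').split(' '); return [t for t in parts[:-1] if t]
def commandParse_alt (line : String) : List String :=
  let cs := line.toList
  let i := PySem.Chars.find cs ['/']
  let pre := if i = -1 then cs else PySem.List.slice cs none (some i)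
  let parts := PySem.Chars.splitOn (PySem.Chars.replace pre ['\n'] [' ']) [' ']
  ((PySem.List.slice parts none (some (-1))).filter (fun t => !t.isEmpty)).map String.ofList

-- ===== PRECONDITION & SPEC =====
def Spec_commandParse (line : String) (out : List String) : Prop := out = commandParse_alt line
instance (line : String) (out : List String) : Decidable (Spec_commandParse line out) := by unfold Spec_commandParse; infer_instance

-- ===== CLAIM (what is proved, stated in full; the proofs are below) =====
def Claim_equal_commandParse : Prop := ∀ (line : String), Dom_commandParse line → Spec_commandParse line (commandParse line)

-- ===== LEMMAS AND PROOFS =====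

-- reference versions of the B pipeline, structural on the char list
def pvSwap (c : Char) : Char := if c = '\n' then ' ' else c

def pvRef : List Char → List (List Char)
  | [] => [[]]
  | c :: t => if c = ' ' then [] :: pvRef t else (pvRef t).modifyHead (c :: ·)

theorem pvRef_ne_nil (l : List Char) : pvRef l ≠ [] := by
  cases l with
  | nil => simp [pvRef]
  | cons c t =>
    simp only [pvRef]
    split
    · simp
    · intro h
      have := List.modifyHead_eq_nil_iff.mp h
      exact pvRef_ne_nil t this

theorem pv_replace_go_eq (fuel : Nat) (l acc : List Char) (h : l.length ≤ fuel) :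
    PySem.Chars.replace.go ['\n'] [' '] fuel l acc = acc.reverse ++ l.map pvSwap := by
  induction fuel generalizing l acc with
  | zero =>
    have : l = [] := by cases l <;> simp_all
    subst this; simp [PySem.Chars.replace.go]
  | succ n ih =>
    cases l with
    | nil => simp [PySem.Chars.replace.go]
    | cons c t =>
      simp only [PySem.Chars.replace.go]
      by_cases hc : c = '\n'
      · subst hc
        have hp : List.isPrefixOf ['\n'] ('\n' :: t) = true := by simp [List.isPrefixOf]
        rw [if_pos hp]
        simp only [List.length_cons] at h
        have hd1 : List.drop ['\n'].length ('\n' :: t) = t := rfl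
        have hd2 : [' '].reverse ++ acc = ' ' :: acc := rfl
        rw [hd1, hd2, ih t (' ' :: acc) (by omega)]
        simp [pvSwap]
      · have hp : List.isPrefixOf ['\n'] (c :: t) = false := by
          simp [List.isPrefixOf]; exact fun h' => hc h'.symm
        rw [if_neg (by simp [hp])]
        simp only [List.length_cons] at h
        rw [ih t (c :: acc) (by omega)]
        simp [pvSwap, hc]

theorem pv_replace_eq (l : List Char) :
    PySem.Chars.replace l ['\n'] [' '] = l.map pvSwap := by
  simp only [PySem.Chars.replace]
  rw [if_neg (by simp)]
  simpa using pv_replace_go_eq l.length l [] le_rfl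

theorem pv_splitOn_go_eq (fuel : Nat) (l cur : List Char) (acc : List (List Char))
    (h : l.length ≤ fuel) :
    PySem.Chars.splitOn.go [' '] fuel l cur acc
      = acc.reverse ++ (pvRef l).modifyHead (cur.reverse ++ ·) := by
  induction fuel generalizing l cur acc with
  | zero =>
    have : l = [] := by cases l <;> simp_all
    subst this; simp [PySem.Chars.splitOn.go, pvRef]
  | succ n ih =>
    cases l with
    | nil => simp [PySem.Chars.splitOn.go, pvRef]
    | cons c t =>
      simp only [PySem.Chars.splitOn.go]
      by_cases hc : c = ' '
      · subst hc
        have hp : List.isPrefixOf [' '] (' ' :: t) = true := by simp [List.isPrefixOf]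
        rw [if_pos hp]
        simp only [List.length_cons] at h
        have hd1 : List.drop [' '].length (' ' :: t) = t := rfl
        rw [hd1, ih t [] (cur.reverse :: acc) (by omega)]
        simp only [pvRef, List.reverse_nil, List.nil_append,
          List.reverse_cons, List.append_assoc, List.singleton_append]
        cases hr : pvRef t <;> simp
      · have hp : List.isPrefixOf [' '] (c :: t) = false := by
          simp [List.isPrefixOf]; exact fun h' => hc h'.symm
        rw [if_neg (by simp [hp])]
        simp only [List.length_cons] at h
        rw [ih t (c :: cur) acc (by omega)]
        simp only [pvRef, if_neg hc]
        congr 1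
        rw [List.modifyHead_modifyHead]
        congr 1
        funext x
        simp

theorem pv_splitOn_eq (l : List Char) :
    PySem.Chars.splitOn l [' '] = pvRef l := by
  simp only [PySem.Chars.splitOn]
  rw [pv_splitOn_go_eq (l.length + 1) l [] [] (by omega)]
  simp only [List.reverse_nil, List.nil_append]
  cases hr : pvRef l with
  | nil => exact absurd hr (pvRef_ne_nil l)
  | cons a t => simp

theorem pv_map_swap_id (t : List Char) (h : '\n' ∉ t) : t.map pvSwap = t := by
  induction t with
  | nil => rfl
  | cons c r ih =>
    simp only [List.mem_cons, not_or] at h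
    simp [pvSwap, Ne.symm h.1, ih h.2]

theorem pv_ref_append_space (t xs : List Char) (h : ' ' ∉ t) :
    pvRef (t ++ ' ' :: xs) = t :: pvRef xs := by
  induction t with
  | nil => simp [pvRef]
  | cons a r ih =>
    simp only [List.mem_cons, not_or] at h
    have ha : ¬ a = ' ' := fun he => h.1 he.symm
    simp only [List.cons_append, pvRef, if_neg ha, ih h.2, List.modifyHead_cons]

theorem pv_ref_no_space (t : List Char) (h : ' ' ∉ t) : pvRef t = [t] := by
  induction t with
  | nil => rfl
  | cons a r ih =>
    simp only [List.mem_cons, not_or] at h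
    have ha : ¬ a = ' ' := fun he => h.1 he.symm
    simp [pvRef, if_neg ha, ih h.2]

-- A's loop equals B's split pipeline on any '/'-free char list
theorem pv_loop_eq (cs : List Char) (temp : List Char) (args : List String)
    (ht1 : ' ' ∉ temp) (ht2 : '\n' ∉ temp) (hcs : '/' ∉ cs) :
    commandParseLoop cs args temp
      = args ++ (((pvRef ((temp ++ cs).map pvSwap)).dropLast.filter
          (fun t => !t.isEmpty)).map String.ofList) := by
  induction cs generalizing temp args with
  | nil =>
    rw [List.append_nil, pv_map_swap_id temp ht2, pv_ref_no_space temp ht1]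
    simp [commandParseLoop]
  | cons c rest ih =>
    simp only [List.mem_cons, not_or] at hcs
    simp only [commandParseLoop, if_neg (Ne.symm hcs.1)]
    by_cases hc : c ≠ ' ' ∧ c ≠ '\n'
    · rw [if_pos hc]
      rw [ih (temp ++ [c]) args (by simp [ht1, Ne.symm hc.1]) (by simp [ht2, Ne.symm hc.2])
            hcs.2]
      simp
    · rw [if_neg hc]
      have hsw : pvSwap c = ' ' := by
        rcases not_and_or.mp hc with h | h
        · simp only [not_not] at h; simp [pvSwap, h]
        · simp only [not_not] at h; simp [pvSwap, h]
      have hmap : (temp ++ c :: rest).map pvSwap = temp ++ ' ' :: rest.map pvSwap := by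
        rw [List.map_append, pv_map_swap_id temp ht2, List.map_cons, hsw]
      rw [hmap, pv_ref_append_space temp (rest.map pvSwap) ht1]
      rw [List.dropLast_cons_of_ne_nil (pvRef_ne_nil _)]
      by_cases hte : temp = []
      · subst hte
        rw [if_neg (by simp)]
        rw [ih [] args (by simp) (by simp) hcs.2]
        simp
      · rw [if_pos hte]
        rw [ih [] (args ++ [String.ofList temp]) (by simp) (by simp) hcs.2]
        simp [hte]

-- breaking at the first '/' = running on the '/'-free prefix
theorem pv_loop_break (cs : List Char) (args : List String) (temp : List Char) :
    commandParseLoop cs args temp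
      = commandParseLoop (cs.takeWhile (fun c => c != '/')) args temp := by
  induction cs generalizing args temp with
  | nil => rfl
  | cons c rest ih =>
    by_cases hc : c = '/'
    · subst hc; simp [commandParseLoop]
    · have hb : (c != '/') = true := by simp [hc]
      rw [List.takeWhile_cons, if_pos hb]
      show (if c = '/' then args else _) = (if c = '/' then args else _)
      rw [if_neg hc, if_neg hc]
      split_ifs <;> exact ih _ _

theorem pv_take_eq_takeWhile (s : List Char) (k : Nat)
    (hmin : ∀ i, i < k → ¬ ['/'] <+: s.drop i)
    (hat : ['/'] <+: s.drop k) :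
    s.takeWhile (fun c => c != '/') = s.take k := by
  induction s generalizing k with
  | nil => simp at hat
  | cons c t ih =>
    cases k with
    | zero =>
      simp only [List.drop_zero] at hat
      rcases hat with ⟨u, hu⟩
      have hc : c = '/' := by simpa using (congrArg List.head? hu).symm
      simp [hc]
    | succ k =>
      have hc : c ≠ '/' := by
        intro h; subst h
        exact hmin 0 (Nat.succ_pos _) ⟨t, by simp⟩
      simp only [List.takeWhile_cons, bne_iff_ne, ne_eq, hc, not_false_eq_true, if_pos,
        List.take_succ_cons]
      exact congrArg (c :: ·) (ih k (fun i hi => hmin (i + 1) (by omega) ) hat)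

theorem pv_mem_iff_infix (a : Char) (l : List Char) : [a] <:+: l ↔ a ∈ l := by
  constructor
  · intro h; exact h.sublist.subset (List.mem_singleton_self a)
  · intro h
    rcases List.append_of_mem h with ⟨s, t, rfl⟩
    exact ⟨s, t, by simp⟩

-- B's comment cut equals takeWhile (· != '/')
theorem pv_prefix_eq (cs : List Char) :
    (if PySem.Chars.find cs ['/'] = -1 then cs
     else PySem.List.slice cs none (some (PySem.Chars.find cs ['/'])))
      = cs.takeWhile (fun c => c != '/') := by
  by_cases h : PySem.Chars.find cs ['/'] = -1
  · rw [if_pos h]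
    have hni : '/' ∉ cs := fun hm =>
      (PySem.Chars.find_eq_neg_one_iff cs ['/']).mp h ((pv_mem_iff_infix '/' cs).mpr hm)
    exact (List.takeWhile_eq_self_iff.mpr (fun c hc => by
      simp only [bne_iff_ne, ne_eq]
      intro he; exact hni (he ▸ hc))).symm
  · rw [if_neg h]
    have hge : 0 ≤ PySem.Chars.find cs ['/'] := by
      have := PySem.Chars.neg_one_le_find cs ['/']
      omega
    rw [PySem.List.slice_to cs hge]
    rcases PySem.Chars.find_spec hge with ⟨hpre, hmin⟩
    exact (pv_take_eq_takeWhile cs (PySem.Chars.find cs ['/']).toNat hmin hpre).symm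

-- ===== VERDICT (by name: the statement is the Claim_ definition above) =====
theorem commandParse_spec : Claim_equal_commandParse := by
  intro line _
  simp only [Spec_commandParse, commandParse, commandParse_alt]
  rw [pv_prefix_eq line.toList, pv_replace_eq, pv_splitOn_eq,
    PySem.List.slice_to_neg_one]
  rw [pv_loop_break, pv_loop_eq _ [] [] (by simp) (by simp)
    (fun hm => by simpa using List.mem_takeWhile_imp hm)]
  simp
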